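-- pv_equiv track=rewrite | github.com/hymntaha/data-structure-python | EducativePythonPath/DS/Lists/removeEven.py | removeEven
-- ===== SOURCE A (Python) =====
-- def removeEven(arr):
--     left = 0
--     right = 1
--
--     while right <= len(arr) - 1:
--         if arr[left] % 2 == 1:
--             left += 1
--             right += 1
--         elif arr[left] % 2 == 0 and arr[right] % 2 == 0:
--             right += 1
--         elif arr[right] % 2 == 1:
--             arr[left],arr[right] = arr[right],arr[left]
--             left += 1
--             right += 1
--
--     for i in range(len(arr) - 1, -1, -1):
--         if arr[i] % 2 == 0:
--             arr.pop()
--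
--
--     return arr
-- ===== SOURCE B (Python) =====
-- def removeEven(arr):
--     # One forward filtering pass; slice assignment mutates the same list object
--     # in place, like A does.
--     arr[:] = [x for x in arr if x % 2 == 1]
--     return arr
-- ===== Notes on version B (the rewrite author's own statement) =====
-- stated objective: simpler
-- what changed: A's in-place two-pointer swapping partition followed by a backwards pop loop is replaced by a single forward filter pass whose result is slice-assigned back into the same list.
import Mathlib
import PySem

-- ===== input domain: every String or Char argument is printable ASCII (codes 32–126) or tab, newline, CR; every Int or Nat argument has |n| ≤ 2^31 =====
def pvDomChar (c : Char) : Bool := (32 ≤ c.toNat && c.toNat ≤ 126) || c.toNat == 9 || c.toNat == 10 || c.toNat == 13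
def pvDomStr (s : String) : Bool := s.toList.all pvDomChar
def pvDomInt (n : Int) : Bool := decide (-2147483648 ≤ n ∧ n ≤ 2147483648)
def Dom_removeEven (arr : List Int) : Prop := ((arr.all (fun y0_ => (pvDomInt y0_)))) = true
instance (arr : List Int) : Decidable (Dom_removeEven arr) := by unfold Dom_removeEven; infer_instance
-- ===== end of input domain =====

-- B replaces A's two-pointer swapping partition + backwards pop loop by a single
-- filter pass (slice-assigned back, so the same list object is mutated, like A);
-- the equivalence proved here is about the return value.

-- ===== PORT A =====
-- while loop: every branch advances `right` by 1, so it terminates on arr.length - right.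
-- All indices used are Nat and in range (left < right < len throughout), so List.getD is exact.
-- The final `else` is unreachable (x % 2 is always 0 or 1), kept as a non-recursive fall-through.
def partLoop (arr : List Int) (left right : Nat) : List Int :=
  if _h : right < arr.length then
    if arr.getD left 0 % 2 == 1 then partLoop arr (left + 1) (right + 1)
    else if arr.getD left 0 % 2 == 0 && arr.getD right 0 % 2 == 0 then
      partLoop arr left (right + 1)
    else if arr.getD right 0 % 2 == 1 then
      partLoop ((arr.set left (arr.getD right 0)).set right (arr.getD left 0))
        (left + 1) (right + 1)
    else arr
  else arr
termination_by arr.length - right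
decreasing_by all_goals first | omega | (simp [List.length_set]; omega)

-- for i in range(len(arr)-1, -1, -1): if arr[i] % 2 == 0: arr.pop()
-- range(len-1,-1,-1) is the indices len-1 .. 0, ported as (List.range n).reverse (exact);
-- arr.pop() removes the last element, i.e. dropLast.
def popLoop (arr : List Int) : List Int :=
  (List.range arr.length).reverse.foldl
    (fun a i => if a.getD i 0 % 2 == 0 then a.dropLast else a) arr

def removeEven (arr : List Int) : List Int := popLoop (partLoop arr 0 1)

-- ===== PORT B =====
def removeEven_alt (arr : List Int) : List Int := arr.filter (fun x => x % 2 == 1)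

-- ===== PRECONDITION & SPEC =====
def Spec_removeEven (arr : List Int) (out : List Int) : Prop := out = removeEven_alt arr
instance (arr : List Int) (out : List Int) : Decidable (Spec_removeEven arr out) := by unfold Spec_removeEven; infer_instance

-- ===== CLAIM (what is proved, stated in full; the proofs are below) =====
def Claim_equal_removeEven : Prop := ∀ (arr : List Int), Dom_removeEven arr → Spec_removeEven arr (removeEven arr)

-- ===== LEMMAS AND PROOFS =====

-- The partition loop, viewed on the decomposition arr = o ++ g ++ rest with
-- left = |o| (all odd so far), [left,right) = g (all even, or the single yet-unexamined
-- element when right = left+1), returns (filter odd arr) ++ (an all-even tail).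
lemma partLoop_spec : ∀ (rest o g : List Int), g ≠ [] →
    (∀ x ∈ o, x % 2 = 1) →
    ((∀ x ∈ g, x % 2 = 0) ∨ g.length = 1) →
    ∃ e', partLoop (o ++ g ++ rest) o.length (o.length + g.length)
          = (o ++ g ++ rest).filter (fun x => x % 2 == 1) ++ e'
        ∧ ∀ x ∈ e', x % 2 = 0 := by
  intro rest
  induction rest with
  | nil =>
    intro o g hne ho hg
    rw [partLoop, dif_neg (by simp)]
    have hfo : o.filter (fun x => x % 2 == 1) = o :=
      List.filter_eq_self.mpr (fun x hx => by simp [ho x hx])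
    rcases hg with hg | hg
    · refine ⟨g, ?_, hg⟩
      have hfg : g.filter (fun x => x % 2 == 1) = [] :=
        List.filter_eq_nil_iff.mpr (fun x hx => by simp [hg x hx])
      simp [List.filter_append, hfo, hfg]
    · obtain ⟨x, rfl⟩ : ∃ x, g = [x] := by
        cases g with
        | nil => simp at hne
        | cons a t =>
          cases t with
          | nil => exact ⟨a, rfl⟩
          | cons b u => simp at hg
      rcases Int.emod_two_eq x with hx | hx
      · exact ⟨[x], by simp [List.filter_append, hfo, hx], by intro y hy; simp at hy; subst hy; exact hx⟩
      · exact ⟨[], by simp [List.filter_append, hfo, hx], by simp⟩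
  | cons r rest' ih =>
    intro o g hne ho hg
    obtain ⟨gh, gt, rfl⟩ := List.exists_cons_of_ne_nil hne
    have hal : (o ++ (gh::gt) ++ (r::rest')).getD o.length 0 = gh := by
      rw [List.getD_eq_getElem _ _ (by simp), List.getElem_append_left (by simp),
        List.getElem_append_right (by simp)]
      simp
    have har : (o ++ (gh::gt) ++ (r::rest')).getD (o.length + (gh::gt).length) 0 = r := by
      rw [List.getD_eq_getElem _ _ (by simp), List.getElem_append_right (by simp)]
      simp [List.getElem_cons]
    have hgt : ∀ x ∈ gt, x % 2 = 0 := by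
      rcases hg with h | h
      · exact fun x hx => h x (by simp [hx])
      · have : gt = [] := by simpa using h
        subst this; simp
    rw [partLoop, dif_pos (by simp), hal, har]
    rcases Int.emod_two_eq gh with hgh | hgh
    · rcases Int.emod_two_eq r with hr | hr
      · -- both even: grow the even gap
        rw [if_neg (by simp [hgh]), if_pos (by simp [hgh, hr])]
        have harr : o ++ (gh::gt) ++ (r::rest') = o ++ (gh :: (gt ++ [r])) ++ rest' := by
          simp
        obtain ⟨e', heq, he⟩ := ih o (gh :: (gt ++ [r])) (by simp) ho
          (Or.inl (by
            intro x hx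
            rcases List.mem_cons.mp hx with rfl | hx
            · exact hgh
            · rcases List.mem_append.mp hx with hx | hx
              · exact hgt x hx
              · simp at hx; subst hx; exact hr))
        refine ⟨e', ?_, he⟩
        simp only [harr]
        simp only [List.append_assoc, List.cons_append, List.nil_append,
          List.length_append, List.length_cons,
          List.length_nil, Nat.zero_add] at heq ⊢
        exact heq
      · -- left even, right odd: swap
        rw [if_neg (by simp [hgh]), if_neg (by simp [hr]), if_pos (by simp [hr])]
        have hset : ((o ++ (gh::gt) ++ (r::rest')).set o.length r).set
              (o.length + (gh::gt).length) gh
            = (o ++ [r]) ++ (gt ++ [gh]) ++ rest' := by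
          rw [List.append_assoc, List.set_append_right _ _ (by omega)]
          simp only [Nat.sub_self]
          rw [List.append_assoc, List.set_append_right _ _ (by omega)]
          simp
        obtain ⟨e', heq, he⟩ := ih (o ++ [r]) (gt ++ [gh]) (by simp)
          (by
            intro x hx
            rcases List.mem_append.mp hx with hx | hx
            · exact ho x hx
            · simp at hx; subst hx; exact hr)
          (Or.inl (by
            intro x hx
            rcases List.mem_append.mp hx with hx | hx
            · exact hgt x hx
            · simp at hx; subst hx; exact hgh))
        refine ⟨e', ?_, he⟩
        rw [hset]
        have hfilt : ((o ++ [r]) ++ (gt ++ [gh]) ++ rest').filter (fun x => x % 2 == 1)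
            = (o ++ (gh::gt) ++ (r::rest')).filter (fun x => x % 2 == 1) := by
          have h1 : o.filter (fun x => x % 2 == 1) = o :=
            List.filter_eq_self.mpr (fun x hx => by simp [ho x hx])
          have h2 : gt.filter (fun x => x % 2 == 1) = [] :=
            List.filter_eq_nil_iff.mpr (fun x hx => by simp [hgt x hx])
          simp [List.filter_append, h1, h2, hgh, hr]
        rw [← hfilt]
        simp only [List.append_assoc, List.cons_append, List.nil_append,
          List.length_append, List.length_cons, List.length_nil,
          Nat.zero_add] at heq ⊢
        rw [show o.length + (gt.length + 1) + 1 = o.length + 1 + (gt.length + 1) from by omega]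
        exact heq
      -- (r % 2 ∈ {0,1}, so the final fall-through else is unreachable)
    · -- left odd: advance both pointers
      rw [if_pos (by simp [hgh])]
      have hgtnil : gt = [] := by
        rcases hg with h | h
        · have := h gh (by simp); omega
        · simpa using h
      subst hgtnil
      obtain ⟨e', heq, he⟩ := ih (o ++ [gh]) [r] (by simp)
        (by
          intro x hx
          rcases List.mem_append.mp hx with hx | hx
          · exact ho x hx
          · simp at hx; subst hx; exact hgh)
        (Or.inr rfl)
      refine ⟨e', ?_, he⟩
      simp only [List.append_assoc, List.cons_append, List.nil_append,
        List.length_append, List.length_cons,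
        List.length_nil, Nat.zero_add] at heq ⊢
      exact heq

lemma foldl_keep (o : List Int) (ho : ∀ x ∈ o, x % 2 = 1) :
    ∀ idxs : List Nat, (∀ i ∈ idxs, i < o.length) →
      idxs.foldl (fun a i => if a.getD i 0 % 2 == 0 then a.dropLast else a) o = o := by
  intro idxs
  induction idxs with
  | nil => intro _; rfl
  | cons i is ih =>
    intro h
    have hi : i < o.length := h i (by simp)
    have : o.getD i 0 = o[i] := List.getD_eq_getElem o 0 hi
    have hodd : o[i] % 2 = 1 := ho _ (List.getElem_mem hi)
    simp only [List.foldl_cons, this, hodd]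
    simpa using ih (fun j hj => h j (by simp [hj]))

lemma popLoop_eq (o e : List Int) (ho : ∀ x ∈ o, x % 2 = 1) (he : ∀ x ∈ e, x % 2 = 0) :
    popLoop (o ++ e) = o := by
  unfold popLoop
  rw [List.length_append]
  induction e using List.reverseRecOn with
  | nil =>
    simp only [List.append_nil, List.length_nil, Nat.add_zero]
    exact foldl_keep o ho _ (by simp)
  | append_singleton e' x ih =>
    have hx : x % 2 = 0 := he x (by simp)
    have he' : ∀ y ∈ e', y % 2 = 0 := fun y hy => he y (by simp [hy])
    have hlen : o.length + (e' ++ [x]).length = (o.length + e'.length) + 1 := by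
      simp; omega
    rw [hlen, List.range_succ, List.reverse_append]
    simp only [List.reverse_singleton, List.singleton_append, List.foldl_cons]
    have hget : (o ++ (e' ++ [x])).getD (o.length + e'.length) 0 = x := by
      rw [← List.append_assoc]
      have : (o ++ e').length = o.length + e'.length := List.length_append ..
      rw [List.getD_eq_getElem _ 0 (by simp), List.getElem_append_right (by omega)]
      simp
    have hdrop : (o ++ (e' ++ [x])).dropLast = o ++ e' := by
      rw [← List.append_assoc, List.dropLast_concat]
    rw [hget, hdrop]
    simp only [hx]
    simpa using ih he' 

-- ===== VERDICT (by name: the statement is the Claim_ definition above) =====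
theorem removeEven_spec : Claim_equal_removeEven := by
  unfold Claim_equal_removeEven
  intro arr _
  unfold Spec_removeEven removeEven removeEven_alt
  cases arr with
  | nil => rw [partLoop]; simp [popLoop]
  | cons a t =>
    obtain ⟨e', heq, he⟩ := partLoop_spec t [] [a] (by simp) (by simp) (Or.inr rfl)
    simp only [List.nil_append, List.singleton_append, List.length_nil,
      List.length_cons, Nat.zero_add] at heq
    rw [heq]
    exact popLoop_eq _ e'
      (fun x hx => by simpa using List.of_mem_filter hx) he
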